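-- pv_equiv track=rewrite | github.com/IlyaPodprugin/tetrika-school-test-task | task1.py | task_binary_search
-- ===== SOURCE A (Python) =====
-- from typing import Union
--
-- def task_binary_search(array: Union[list, str]) -> Union[int, None]:
-- 	start: int = 0
-- 	end: int = len(array) - 1
--
-- 	while start <= end:
-- 		mid: int = (start + end) // 2
-- 		guess: str = str(array[mid])
-- 		if guess == "0":
-- 			if str(array[mid - 1]) == "1" or mid == 0:
-- 				return mid
-- 			end = mid - 1
-- 		elif guess == "1":
-- 			start = mid + 1
-- 		else:
-- 			return None
-- 	return None
-- ===== SOURCE B (Python) =====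
-- def task_binary_search(array):
--     # Recursive divide-and-conquer on sub-slices: carry the slice's global
--     # offset and the element just before the slice (None at the array start).
--     def go(sub, off, prev):
--         if not sub:
--             return None
--         k = (len(sub) - 1) // 2
--         guess = str(sub[k])
--         if guess == "0":
--             left = sub[k - 1] if k > 0 else prev
--             if left is None or str(left) == "1":
--                 return off + k
--             return go(sub[:k], off, prev)
--         if guess == "1":
--             return go(sub[k + 1:], off + k + 1, sub[k])
--         return None
--     return go(array, 0, None)
-- ===== Notes on version B (the rewrite author's own statement) =====
-- stated objective: alternative
-- what changed: Replaces the imperative while-loop over start/end indices with a recursive divide-and-conquer over actual sub-slices, carrying the slice's global offset and the element preceding the slice instead of re-indexing the full array.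
import Mathlib
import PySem

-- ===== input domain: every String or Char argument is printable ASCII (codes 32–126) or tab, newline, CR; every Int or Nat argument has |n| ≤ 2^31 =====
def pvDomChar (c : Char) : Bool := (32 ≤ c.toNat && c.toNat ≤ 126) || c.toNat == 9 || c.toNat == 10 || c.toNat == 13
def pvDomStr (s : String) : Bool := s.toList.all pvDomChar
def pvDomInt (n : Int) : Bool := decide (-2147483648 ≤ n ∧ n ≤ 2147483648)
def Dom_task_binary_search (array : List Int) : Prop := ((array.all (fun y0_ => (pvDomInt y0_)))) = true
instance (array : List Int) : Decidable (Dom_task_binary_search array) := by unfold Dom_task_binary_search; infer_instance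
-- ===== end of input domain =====

-- B re-decomposes A's index-based while loop as a recursion on sub-slices; the return values are proved equal on all Int lists.

-- ===== PORT A =====
-- the while loop over (start, end); array[mid] / array[mid-1] via pyGet? (the
-- Python indices are always in range here, incl. the array[-1] wraparound at mid = 0).
def taskA_go (array : List Int) (start endi : Int) : Option Int :=
  if _hle : start ≤ endi then
    let mid : Int := PySem.Int.floordiv (start + endi) 2
    match PySem.List.pyGet? array mid with
    | none => none
    | some v =>
      if PySem.Int.toStr v = "0" then
        if ((PySem.List.pyGet? array (mid - 1)).map PySem.Int.toStr = some "1") ∨ mid = 0 then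
          some mid
        else taskA_go array start (mid - 1)
      else if PySem.Int.toStr v = "1" then
        taskA_go array (mid + 1) endi
      else none
  else none
termination_by (endi - start + 1).toNat
decreasing_by
  all_goals
    obtain ⟨h1, h2⟩ := PySem.Int.floordiv_two_mid_bounds _hle
    omega

def task_binary_search (array : List Int) : Option Int :=
  taskA_go array 0 ((array.length : Int) - 1)

-- ===== PORT B =====
-- recursion on the slice itself; `sub[:k]` / `sub[k+1:]` are take/drop (k ≥ 0 always),
-- `sub[k]` / `sub[k-1]` are in-range nonnegative indices, ported as getElem;
-- `left is None or str(left) == "1"` is the short-circuit disjunction on the Option.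
def taskB_go (sub : List Int) (off : Int) (prev : Option Int) : Option Int :=
  if hne : sub = [] then none
  else
    have hlen : 0 < sub.length := List.length_pos_of_ne_nil hne
    have hk : (sub.length - 1) / 2 < sub.length := by omega
    let k : Nat := (sub.length - 1) / 2
    let v : Int := sub[k]'hk
    if PySem.Int.toStr v = "0" then
      let left : Option Int :=
        if 0 < k then some (sub[k - 1]'(Nat.lt_of_le_of_lt (Nat.sub_le k 1) hk)) else prev
      if left = none ∨ left.map PySem.Int.toStr = some "1" then some (off + (k : Int))
      else taskB_go (sub.take k) off prev
    else if PySem.Int.toStr v = "1" then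
      taskB_go (sub.drop (k + 1)) (off + (k : Int) + 1) (some v)
    else none
termination_by sub.length
decreasing_by
  all_goals simp [List.length_take, List.length_drop]; omega

def task_binary_search_alt (array : List Int) : Option Int :=
  taskB_go array 0 none

-- ===== PRECONDITION & SPEC =====
def Spec_task_binary_search (array : List Int) (out : Option Int) : Prop := out = task_binary_search_alt array
instance (array : List Int) (out : Option Int) : Decidable (Spec_task_binary_search array out) := by unfold Spec_task_binary_search; infer_instance

-- ===== CLAIM (what is proved, stated in full; the proofs are below) =====
def Claim_equal_task_binary_search : Prop := ∀ (array : List Int), Dom_task_binary_search array → Spec_task_binary_search array (task_binary_search array)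

-- ===== LEMMAS AND PROOFS =====

-- The invariant: A's loop on the index window [s, s+n) equals B's recursion on the
-- slice array[s : s+n] carried with its offset s and the element before the slice.
lemma go_eq (n : Nat) : ∀ (s : Nat) (array : List Int), s + n ≤ array.length →
    taskA_go array (s : Int) ((s : Int) + (n : Int) - 1) =
      taskB_go ((array.drop s).take n) (s : Int)
        (if s = 0 then none else array[s - 1]?) := by
  induction n using Nat.strong_induction_on with
  | _ n IH =>
  intro s array hle
  rcases Nat.eq_zero_or_pos n with hn0 | hnpos
  · subst hn0
    rw [taskA_go, taskB_go]
    simp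
  · set sub := (array.drop s).take n with hsubdef
    have hsublen : sub.length = n := by
      rw [hsubdef]; simp [List.length_take, List.length_drop]; omega
    have hsubne : sub ≠ [] := by
      intro h; rw [h] at hsublen; simp at hsublen; omega
    obtain ⟨k, hkdef⟩ : ∃ k, (n - 1) / 2 = k := ⟨_, rfl⟩
    have hkn : k < n := by omega
    have hskl : s + k < array.length := by omega
    rw [taskA_go, taskB_go, dif_pos (show (s:Int) ≤ (s:Int) + (n:Int) - 1 by omega),
        dif_neg hsubne]
    have hmid : PySem.Int.floordiv ((s:Int) + ((s:Int) + (n:Int) - 1)) 2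
        = (s:Int) + (k:Int) := by
      rw [PySem.Int.floordiv_eq_ediv_of_pos (by omega)]; omega
    have hgetA : PySem.List.pyGet? array ((s:Int) + (k:Int)) = some (array[s+k]'hskl) := by
      have hc : (s:Int) + (k:Int) = ((s + k : Nat) : Int) := by push_cast; ring
      rw [hc, PySem.List.pyGet?_natCast, List.getElem?_eq_getElem hskl]
    have hv : ∀ (h : (sub.length - 1) / 2 < sub.length),
        sub[(sub.length - 1) / 2]'h = array[s+k]'hskl := by
      intro h
      simp only [hsubdef, List.getElem_take, List.getElem_drop, List.length_take,
        List.length_drop]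
      exact getElem_congr rfl (by omega) _
    have hv1 : ∀ (h : (sub.length - 1) / 2 - 1 < sub.length),
        sub[(sub.length - 1) / 2 - 1]'h = array[s + (k - 1)]'(by omega) := by
      intro h
      simp only [hsubdef, List.getElem_take, List.getElem_drop, List.length_take,
        List.length_drop]
      exact getElem_congr rfl (by omega) _
    have hkb : (sub.length - 1) / 2 = k := by omega
    simp only [hmid, hgetA, hv, hv1]
    rw [hkb]
    by_cases h0 : PySem.Int.toStr (array[s+k]'hskl) = "0"
    · simp only [h0, if_true]
      rcases Nat.eq_zero_or_pos (s + k) with hsk0 | hskpos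
      · -- s = 0 and k = 0: both sides return index 0 whatever the wrapped-around probe says
        rw [if_pos (Or.inr (show (s:Int) + (k:Int) = 0 by omega)),
            if_neg (by omega : ¬ 0 < k), if_pos (by omega : s = 0),
            if_pos (Or.inl rfl)]
      · -- the probed index is positive: the left neighbour is array[s+k-1] on both sides
        have hgetA1 : PySem.List.pyGet? array ((s:Int) + (k:Int) - 1)
            = some (array[s+k-1]'(by omega)) := by
          have hc : (s:Int) + (k:Int) - 1 = ((s + k - 1 : Nat) : Int) := by omega
          rw [hc, PySem.List.pyGet?_natCast, List.getElem?_eq_getElem (by omega)]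
        rw [hgetA1]
        have hleft : (if 0 < k then some (array[s + (k - 1)]'(by omega))
              else (if s = 0 then none else array[s - 1]?))
            = some (array[s+k-1]'(by omega)) := by
          rcases Nat.eq_zero_or_pos k with hk0 | hkp
          · rw [if_neg (by omega), if_neg (by omega : ¬ s = 0),
                List.getElem?_eq_getElem (show s - 1 < array.length by omega)]
            exact congrArg some (getElem_congr rfl (by omega) _)
          · rw [if_pos hkp]
            exact congrArg some (getElem_congr rfl (by omega) _)
        rw [hleft]
        simp only [Option.map_some, Option.some.injEq, reduceCtorEq, false_or]
        by_cases h1 : PySem.Int.toStr (array[s+k-1]'(by omega)) = "1"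
        · rw [if_pos (Or.inl h1), if_pos h1]
        · rw [if_neg (by rw [not_or]; exact ⟨h1, by omega⟩), if_neg h1]
          have hsubtake : sub.take k = (array.drop s).take k := by
            rw [hsubdef, List.take_take, Nat.min_eq_left (by omega)]
          rw [hsubtake]
          exact IH k hkn s array (by omega)
    · simp only [h0, if_false]
      by_cases h1 : PySem.Int.toStr (array[s+k]'hskl) = "1"
      · simp only [h1, if_true]
        have hrec := IH (n - k - 1) (by omega) (s + k + 1) array (by omega)
        have hc1 : ((s + k + 1 : Nat) : Int) = (s:Int) + (k:Int) + 1 := by push_cast; ring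
        rw [hc1] at hrec
        have hc2 : (s:Int) + (k:Int) + 1 + ((n - k - 1 : Nat) : Int) - 1
            = (s:Int) + (n:Int) - 1 := by omega
        have hprev : (if s + k + 1 = 0 then none else array[s + k + 1 - 1]?)
            = some (array[s+k]'hskl) := by
          rw [if_neg (by omega)]
          rw [List.getElem?_eq_getElem (show s + k + 1 - 1 < array.length by omega)]
          exact congrArg some (getElem_congr rfl (by omega) _)
        rw [hc2, hprev] at hrec
        have hsubdrop : sub.drop (k+1) = (array.drop (s+k+1)).take (n-k-1) := by
          rw [hsubdef, List.drop_take, List.drop_drop]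
          congr 1
        rw [hsubdrop]
        exact hrec
      · simp [h1]

-- ===== VERDICT (by name: the statement is the Claim_ definition above) =====
theorem task_binary_search_spec : Claim_equal_task_binary_search := by
  intro array _
  unfold Spec_task_binary_search task_binary_search task_binary_search_alt
  have h := go_eq array.length 0 array (by omega)
  simpa using h
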